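-- pv_equiv track=rewrite | github.com/kevinsu/aoc | day13/part2/main.py | find_new_symmetry
-- ===== SOURCE A (Python) =====
-- def find_symmetry(l, existing_line):
--   for i in range(1, len(l)):
--     if i == existing_line:
--       continue
--     symmetric = True
--     left = list(reversed(l[0:i]))
--     right = l[i:]
--     for j in range(0, min(len(left), len(right))):
--       if left[j] != right[j]:
--         symmetric = False
--         break
--     if symmetric:
--       return i
--   return 0
--
-- def find_new_symmetry(pattern, rows, columns):
--   row_symmetry = find_symmetry(rows, 0)
--   column_symmetry = find_symmetry(columns, 0)
--   for i, row in enumerate(pattern):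
--     for j, column in enumerate(row):
--       copy_rows = rows.copy()
--       copy_columns = columns.copy()
--       if column == '#':
--         copy_rows[i] -= 2**j
--         copy_columns[j] -= 2**i
--       else:
--         copy_rows[i] += 2**j
--         copy_columns[j] += 2**i
--       copy_row_symmetry = find_symmetry(copy_rows, row_symmetry)
--       copy_column_symmetry = find_symmetry(copy_columns, column_symmetry)
--       if (copy_row_symmetry != row_symmetry and copy_row_symmetry != 0) or (copy_column_symmetry!= column_symmetry and copy_column_symmetry != 0):
--         return copy_row_symmetry, copy_column_symmetry, row_symmetry, column_symmetry, i, j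
--   return 0, 0, -1, -1, -1, -1
-- ===== SOURCE B (Python) =====
-- def find_new_symmetry(pattern, rows, columns):
--   # Per axis, precompute each candidate mirror line's mismatched pair offsets, then for
--   # each row/column index a dictionary: required new value -> first line it would fix.
--   # Each flipped cell is then answered by two O(1) dictionary lookups.
--   def mismatch_table(l):
--     n = len(l)
--     tbl = []
--     for k in range(1, n):
--       tbl.append((k, [t for t in range(min(k, n - k)) if l[k - 1 - t] != l[k + t]]))
--     return tbl
--
--   def first_sym(tbl):
--     for k, ms in tbl:
--       if not ms:
--         return k
--     return 0
--
--   def line_index(l, tbl, i, skip):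
--     # scan candidate lines in order; collect, for lines whose only mismatched pair (if
--     # any) involves position i, the value l must take at i -> first such line; stop at
--     # the first line unaffected by position i that is already symmetric (it always fires)
--     n = len(l)
--     d = {}
--     for k, ms in tbl:
--       if k == skip:
--         continue
--       partner = 2 * k - 1 - i
--       if 0 <= partner < n:
--         t0 = k - 1 - i if i < k else i - k
--         if all(t == t0 for t in ms) and l[partner] not in d:
--           d[l[partner]] = k
--       elif not ms:
--         return d, k
--     return d, 0
--
--   def query(idx, v):
--     d, kfree = idx
--     k = d.get(v, 0)
--     if k and (not kfree or k < kfree):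
--       return k
--     return kfree
--
--   rtbl = mismatch_table(rows)
--   ctbl = mismatch_table(columns)
--   rs = first_sym(rtbl)
--   cs = first_sym(ctbl)
--   col_idx = [line_index(columns, ctbl, j, cs) for j in range(len(columns))]
--   for i, row in enumerate(pattern):
--     ridx = line_index(rows, rtbl, i, rs)
--     for j, ch in enumerate(row):
--       sgn = -1 if ch == '#' else 1
--       crs = query(ridx, rows[i] + sgn * 2 ** j)
--       ccs = query(col_idx[j], columns[j] + sgn * 2 ** i)
--       if crs != 0 or ccs != 0:
--         return crs, ccs, rs, cs, i, j
--   return 0, 0, -1, -1, -1, -1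
-- ===== Notes on version B (the rewrite author's own statement) =====
-- stated objective: faster
-- what changed: Instead of re-running the full mirror-line scan for every flipped cell, B precomputes one mismatch table per axis and, for each row/column position, a dictionary mapping the required new value to the first mirror line it would create, so each flipped cell is decided by two dictionary lookups.
-- outside the precondition, e.g. on find_new_symmetry(['.', '.'], [1], [0, 1]): A returns (0, 1, 0, 0, 0, 0), B returns (0, 1, 0, 0, 0, 0)
import Mathlib
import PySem

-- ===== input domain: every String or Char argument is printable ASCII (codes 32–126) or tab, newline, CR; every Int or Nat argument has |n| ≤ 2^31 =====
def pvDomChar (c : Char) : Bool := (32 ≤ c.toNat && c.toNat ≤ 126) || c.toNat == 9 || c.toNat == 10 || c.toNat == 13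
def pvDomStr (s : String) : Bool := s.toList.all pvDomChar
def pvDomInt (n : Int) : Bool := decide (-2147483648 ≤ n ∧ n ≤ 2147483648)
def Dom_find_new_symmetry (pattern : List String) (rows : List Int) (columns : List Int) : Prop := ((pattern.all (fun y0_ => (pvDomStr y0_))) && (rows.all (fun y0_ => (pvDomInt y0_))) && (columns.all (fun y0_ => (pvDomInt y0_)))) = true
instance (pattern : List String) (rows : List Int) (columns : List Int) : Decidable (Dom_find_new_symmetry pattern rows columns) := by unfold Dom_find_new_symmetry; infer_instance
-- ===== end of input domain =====

-- B precomputes per-line mismatch tables and, per row/column index, a dictionary from the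
-- required new value to the first mirror line it would create, so each flipped cell is
-- answered by dictionary lookups instead of A's full re-scan (objective: faster).

-- ===== PORT A =====

-- inner 'for j in range(min(len(left), len(right)))' comparison loop with break
def pvSymLoop : List Int → List Int → Bool
  | a :: as, b :: bs => if a ≠ b then false else pvSymLoop as bs
  | _, _ => true

-- 'for i in range(1, len(l))' of find_symmetry
def pvFsLoop (l : List Int) (existing : Int) : List Int → Int
  | [] => 0
  | i :: rest =>
    if i = existing then pvFsLoop l existing rest
    else if pvSymLoop ((PySem.List.slice l (some 0) (some i)).reverse)
                      (PySem.List.slice l (some i) none) then i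
    else pvFsLoop l existing rest

def pvFindSymmetry (l : List Int) (existing : Int) : Int :=
  pvFsLoop l existing (PySem.List.pyRange 1 (l.length : Int) 1)

-- inner 'for j, column in enumerate(row)' loop; index into rows/columns is in range under Pre_
def pvCellLoopA (rows columns : List Int) (rs cs : Int) (i : Nat) : Nat → List Char → Option (List Int)
  | _, [] => none
  | j, c :: rest =>
    let p := if c = '#'
      then (PySem.List.pySetD rows (i : Int) (PySem.List.pyGetD rows (i : Int) 0 - 2 ^ j),
            PySem.List.pySetD columns (j : Int) (PySem.List.pyGetD columns (j : Int) 0 - 2 ^ i))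
      else (PySem.List.pySetD rows (i : Int) (PySem.List.pyGetD rows (i : Int) 0 + 2 ^ j),
            PySem.List.pySetD columns (j : Int) (PySem.List.pyGetD columns (j : Int) 0 + 2 ^ i))
    let crs := pvFindSymmetry p.1 rs
    let ccs := pvFindSymmetry p.2 cs
    if (crs ≠ rs ∧ crs ≠ 0) ∨ (ccs ≠ cs ∧ ccs ≠ 0)
      then some [crs, ccs, rs, cs, (i : Int), (j : Int)]
      else pvCellLoopA rows columns rs cs i (j + 1) rest

-- outer 'for i, row in enumerate(pattern)' loop
def pvRowLoopA (rows columns : List Int) (rs cs : Int) : Nat → List String → Option (List Int)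
  | _, [] => none
  | i, r :: rest =>
    match pvCellLoopA rows columns rs cs i 0 r.toList with
    | some out => some out
    | none => pvRowLoopA rows columns rs cs (i + 1) rest

def find_new_symmetry (pattern : List String) (rows : List Int) (columns : List Int) : List Int :=
  let rs := pvFindSymmetry rows 0
  let cs := pvFindSymmetry columns 0
  (pvRowLoopA rows columns rs cs 0 pattern).getD [0, 0, -1, -1, -1, -1]

-- ===== PORT B =====

-- mismatched pair offsets of candidate line k
def pvMism (l : List Int) (k : Int) : List Int :=
  (PySem.List.pyRange 0 (min k ((l.length : Int) - k)) 1).filter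
    (fun t => PySem.List.pyGetD l (k - 1 - t) 0 ≠ PySem.List.pyGetD l (k + t) 0)

def pvMismTable (l : List Int) : List (Int × List Int) :=
  (PySem.List.pyRange 1 (l.length : Int) 1).map (fun k => (k, pvMism l k))

def pvFirstSym : List (Int × List Int) → Int
  | [] => 0
  | (k, ms) :: rest => if ms.isEmpty then k else pvFirstSym rest

-- 'for k, ms in tbl' of line_index, with the dict d as accumulator
def pvLineIdxLoop (l : List Int) (i skip : Int) (d : PySem.Dict Int Int) :
    List (Int × List Int) → PySem.Dict Int Int × Int
  | [] => (d, 0)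
  | (k, ms) :: rest =>
    if k = skip then pvLineIdxLoop l i skip d rest
    else if 0 ≤ 2 * k - 1 - i ∧ 2 * k - 1 - i < (l.length : Int) then
      pvLineIdxLoop l i skip
        (if (∀ t ∈ ms, t = (if i < k then k - 1 - i else i - k)) ∧
            d.contains (PySem.List.pyGetD l (2 * k - 1 - i) 0) = false
          then d.insert (PySem.List.pyGetD l (2 * k - 1 - i) 0) k else d) rest
    else if ms.isEmpty then (d, k) else pvLineIdxLoop l i skip d rest

def pvLineIdx (l : List Int) (i skip : Int) (tbl : List (Int × List Int)) :
    PySem.Dict Int Int × Int :=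
  pvLineIdxLoop l i skip PySem.Dict.empty tbl

def pvQuery (idx : PySem.Dict Int Int × Int) (v : Int) : Int :=
  let k := idx.1.getD v 0
  if k ≠ 0 ∧ (idx.2 = 0 ∨ k < idx.2) then k else idx.2

def pvCellLoopB (rows columns : List Int) (colIdx : List (PySem.Dict Int Int × Int))
    (ridx : PySem.Dict Int Int × Int) (rs cs : Int) (i : Nat) :
    Nat → List Char → Option (List Int)
  | _, [] => none
  | j, c :: rest =>
    let sgn : Int := if c = '#' then -1 else 1
    let crs := pvQuery ridx (PySem.List.pyGetD rows (i : Int) 0 + sgn * 2 ^ j)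
    -- col_idx[j]: in range under Pre_ (j < len(row) ≤ len(columns)), so the default is never used
    let ccs := pvQuery (PySem.List.pyGetD colIdx (j : Int) (PySem.Dict.empty, 0))
      (PySem.List.pyGetD columns (j : Int) 0 + sgn * 2 ^ i)
    if crs ≠ 0 ∨ ccs ≠ 0 then some [crs, ccs, rs, cs, (i : Int), (j : Int)]
    else pvCellLoopB rows columns colIdx ridx rs cs i (j + 1) rest

def pvRowLoopB (rows columns : List Int) (rtbl : List (Int × List Int))
    (colIdx : List (PySem.Dict Int Int × Int)) (rs cs : Int) :
    Nat → List String → Option (List Int)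
  | _, [] => none
  | i, r :: rest =>
    match pvCellLoopB rows columns colIdx (pvLineIdx rows (i : Int) rs rtbl) rs cs i 0
        r.toList with
    | some out => some out
    | none => pvRowLoopB rows columns rtbl colIdx rs cs (i + 1) rest

def find_new_symmetry_alt (pattern : List String) (rows : List Int) (columns : List Int) : List Int :=
  let rtbl := pvMismTable rows
  let ctbl := pvMismTable columns
  let rs := pvFirstSym rtbl
  let cs := pvFirstSym ctbl
  let colIdx := (PySem.List.pyRange 0 (columns.length : Int) 1).map
    (fun j => pvLineIdx columns j cs ctbl)
  (pvRowLoopB rows columns rtbl colIdx rs cs 0 pattern).getD [0, 0, -1, -1, -1, -1]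

-- ===== PRECONDITION & SPEC =====
-- Pre_ restricts to the natural domain where the pattern's dimensions fit within rows/columns;
-- outside it A raises IndexError, except when an earlier cell already yields a new mirror line,
-- in which case A and B return the same value anyway.
def Pre_find_new_symmetry (pattern : List String) (rows : List Int) (columns : List Int) : Prop :=
  pattern.length ≤ rows.length ∧ ∀ s ∈ pattern, s.toList.length ≤ columns.length

instance (pattern : List String) (rows : List Int) (columns : List Int) :
    Decidable (Pre_find_new_symmetry pattern rows columns) := by
  unfold Pre_find_new_symmetry; infer_instance

def pvWitness_find_new_symmetry : List String × List Int × List Int :=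
  (["#.", "#."], [1, 1], [3, 0])

def Spec_find_new_symmetry (pattern : List String) (rows : List Int) (columns : List Int) (out : List Int) : Prop := out = find_new_symmetry_alt pattern rows columns
instance (pattern : List String) (rows : List Int) (columns : List Int) (out : List Int) : Decidable (Spec_find_new_symmetry pattern rows columns out) := by unfold Spec_find_new_symmetry; infer_instance

-- ===== CLAIM (what is proved, stated in full; the proofs are below) =====
def Claim_equal_find_new_symmetry : Prop := ∀ (pattern : List String) (rows : List Int) (columns : List Int), Dom_find_new_symmetry pattern rows columns → Pre_find_new_symmetry pattern rows columns → Spec_find_new_symmetry pattern rows columns (find_new_symmetry pattern rows columns)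

-- ===== LEMMAS AND PROOFS =====

-- proof-side specification of B's per-cell answer: a direct scan of the mismatch table
-- (B's dictionary index is proved equal to this scan, which in turn matches A's loop)
def pvSymAfter (l : List Int) (i v skip : Int) : List (Int × List Int) → Int
  | [] => 0
  | (k, ms) :: rest =>
    if k = skip then pvSymAfter l i v skip rest
    else if 0 ≤ 2 * k - 1 - i ∧ 2 * k - 1 - i < (l.length : Int) then
      (if (∀ t ∈ ms, t = (if i < k then k - 1 - i else i - k)) ∧
          v = PySem.List.pyGetD l (2 * k - 1 - i) 0
        then k else pvSymAfter l i v skip rest)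
    else if ms.isEmpty then k else pvSymAfter l i v skip rest

-- the pointwise reading of the inner comparison loop
theorem pvSymLoop_iff (as bs : List Int) :
    pvSymLoop as bs = true ↔
      ∀ t : Nat, (h1 : t < as.length) → (h2 : t < bs.length) → as[t] = bs[t] := by
  induction as generalizing bs with
  | nil => simp [pvSymLoop]
  | cons a as ih =>
    cases bs with
    | nil => simp [pvSymLoop]
    | cons b bs =>
      rcases eq_or_ne a b with h | h
      · subst h
        rw [show pvSymLoop (a :: as) (a :: bs) = pvSymLoop as bs by simp [pvSymLoop], ih]
        constructor
        · intro H t h1 h2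
          cases t with
          | zero => simp
          | succ t =>
            simpa using H t (by simpa using h1) (by simpa using h2)
        · intro H t h1 h2
          simpa using H (t + 1) (by simpa using h1) (by simpa using h2)
      · rw [show pvSymLoop (a :: as) (b :: bs) = false by simp [pvSymLoop, h]]
        refine iff_of_false (by simp) ?_
        intro H
        exact h (by simpa using H 0 (by simp) (by simp))

-- helper index facts used below
theorem rev_take_getElem (l : List Int) (k t : Nat) (hk2 : k ≤ l.length)
    (h : t < (l.take k).reverse.length) :
    (l.take k).reverse[t] = l.getD (k - 1 - t) 0 := by
  simp at h
  rw [List.getElem_reverse, List.getElem_take, List.getD_eq_getElem]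
  · congr 1
    simp [List.length_take]
    omega
  · omega

theorem drop_getElem (l : List Int) (k t : Nat) (h : t < (l.drop k).length) :
    (l.drop k)[t] = l.getD (k + t) 0 := by
  simp at h
  rw [List.getElem_drop, List.getD_eq_getElem]

-- the symmetry predicate A tests for line k, in pairwise-offset form
def pvSymP (l : List Int) (k : Nat) : Prop :=
  ∀ t : Nat, t < min k (l.length - k) → l.getD (k - 1 - t) 0 = l.getD (k + t) 0

theorem symA_iff (l : List Int) (k : Nat) (hk2 : k ≤ l.length) :
    (pvSymLoop ((PySem.List.slice l (some (0 : Int)) (some (k : Int))).reverse)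
               (PySem.List.slice l (some (k : Int)) none) = true) ↔ pvSymP l k := by
  have e0 : PySem.List.slice l (some (0 : Int)) (some (k : Int)) = l.take k := by
    rw [PySem.List.slice_zero_start, PySem.List.slice_to_natCast]
  have e1 : PySem.List.slice l (some (k : Int)) none = l.drop k :=
    PySem.List.slice_from_natCast l k
  rw [e0, e1, pvSymLoop_iff]
  unfold pvSymP
  constructor
  · intro H t ht
    have h1 : t < (l.take k).reverse.length := by simp; omega
    have h2 : t < (l.drop k).length := by simp; omega
    have := H t h1 h2
    rwa [rev_take_getElem l k t hk2 h1, drop_getElem l k t h2] at this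
  · intro H t h1 h2
    rw [rev_take_getElem l k t hk2 h1, drop_getElem l k t h2]
    apply H
    simp at h1 h2
    omega

theorem mem_mism (l : List Int) (k : Nat) (hk2 : k ≤ l.length) (x : Int) :
    x ∈ pvMism l (k : Int) ↔
      ∃ t : Nat, t < min k (l.length - k) ∧ x = (t : Int) ∧
        l.getD (k - 1 - t) 0 ≠ l.getD (k + t) 0 := by
  unfold pvMism
  rw [List.mem_filter, PySem.List.mem_pyRange_one]
  simp only [decide_eq_true_eq]
  constructor
  · rintro ⟨⟨hx0, hxM⟩, hne⟩
    have hxk : x < (k : Int) := lt_of_lt_of_le hxM (min_le_left _ _)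
    refine ⟨x.toNat, by omega, by omega, ?_⟩
    have e1 : (k : Int) - 1 - x = ((k - 1 - x.toNat : Nat) : Int) := by omega
    have e2 : (k : Int) + x = ((k + x.toNat : Nat) : Int) := by omega
    rw [e1, e2, PySem.List.pyGetD_natCast, PySem.List.pyGetD_natCast] at hne
    exact hne
  · rintro ⟨t, ht, rfl, hne⟩
    refine ⟨⟨by omega, by omega⟩, ?_⟩
    have e1 : (k : Int) - 1 - (t : Int) = ((k - 1 - t : Nat) : Int) := by omega
    have e2 : (k : Int) + (t : Int) = ((k + t : Nat) : Int) := by omega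
    rw [e1, e2, PySem.List.pyGetD_natCast, PySem.List.pyGetD_natCast]
    exact hne

theorem mism_nil_iff (l : List Int) (k : Nat) (hk2 : k ≤ l.length) :
    pvMism l (k : Int) = [] ↔ pvSymP l k := by
  constructor
  · intro h t ht
    by_contra hne
    exact (List.eq_nil_iff_forall_not_mem.mp h (t : Int))
      ((mem_mism l k hk2 _).mpr ⟨t, ht, rfl, hne⟩)
  · intro h
    rw [List.eq_nil_iff_forall_not_mem]
    intro x hx
    obtain ⟨t, ht, rfl, hne⟩ := (mem_mism l k hk2 x).mp hx
    exact hne (h t ht)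

theorem mism_all_iff (l : List Int) (k t0 : Nat) (hk2 : k ≤ l.length) :
    (∀ x ∈ pvMism l (k : Int), x = (t0 : Int)) ↔
      ∀ t : Nat, t < min k (l.length - k) → t ≠ t0 →
        l.getD (k - 1 - t) 0 = l.getD (k + t) 0 := by
  constructor
  · intro h t ht hne
    by_contra hne2
    have := h (t : Int) ((mem_mism l k hk2 _).mpr ⟨t, ht, rfl, hne2⟩)
    exact hne (by omega)
  · intro h x hx
    obtain ⟨t, ht, rfl, hne⟩ := (mem_mism l k hk2 x).mp hx
    by_contra hxe
    exact hne (h t ht (by omega))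

theorem getD_set (l : List Int) (i : Nat) (v : Int) (m : Nat) (hi : i < l.length) :
    (l.set i v).getD m 0 = if m = i then v else l.getD m 0 := by
  rcases Nat.lt_or_ge m l.length with h | h
  · rw [List.getD_eq_getElem _ _ (by simpa using h), List.getElem_set]
    split_ifs with h1 h2 h2
    · rfl
    · exact absurd h1.symm h2
    · exact absurd h2.symm h1
    · rw [List.getD_eq_getElem _ _ h]
  · rw [List.getD_eq_default _ _ (by simpa using h), if_neg (by omega),
      List.getD_eq_default _ _ h]

theorem symP_set_paired (l : List Int) (i k : Nat) (v : Int)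
    (hi : i < l.length) (hkn : k < l.length)
    (hp1 : i < 2 * k) (hp2 : 2 * k - 1 - i < l.length) :
    pvSymP (l.set i v) k ↔
      ((∀ t : Nat, t < min k (l.length - k) → t ≠ (if i < k then k - 1 - i else i - k) →
          l.getD (k - 1 - t) 0 = l.getD (k + t) 0) ∧
        v = l.getD (2 * k - 1 - i) 0) := by
  unfold pvSymP
  rw [List.length_set]
  have hT : (if i < k then k - 1 - i else i - k) < min k (l.length - k) := by
    by_cases hik : i < k
    · rw [if_pos hik]; omega
    · rw [if_neg hik]; omega
  have key : ∀ t : Nat, t < min k (l.length - k) →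
      (((l.set i v).getD (k - 1 - t) 0 = (l.set i v).getD (k + t) 0) ↔
        (if t = (if i < k then k - 1 - i else i - k) then v = l.getD (2 * k - 1 - i) 0
          else l.getD (k - 1 - t) 0 = l.getD (k + t) 0)) := by
    intro t ht
    rw [getD_set l i v _ hi, getD_set l i v _ hi]
    by_cases h1 : k - 1 - t = i
    · have hik : i < k := by omega
      have ht0 : t = (if i < k then k - 1 - i else i - k) := by rw [if_pos hik]; omega
      have h2 : ¬ (k + t = i) := by omega
      have hp : k + t = 2 * k - 1 - i := by omega
      rw [if_pos h1, if_neg h2, if_pos ht0, hp]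
    · by_cases h2 : k + t = i
      · have hik : ¬ (i < k) := by omega
        have ht0 : t = (if i < k then k - 1 - i else i - k) := by rw [if_neg hik]; omega
        have hp : k - 1 - t = 2 * k - 1 - i := by omega
        rw [if_neg h1, if_pos h2, if_pos ht0, hp, eq_comm]
      · have ht0 : ¬ (t = (if i < k then k - 1 - i else i - k)) := by
          by_cases hik : i < k
          · rw [if_pos hik]; omega
          · rw [if_neg hik]; omega
        rw [if_neg h1, if_neg h2, if_neg ht0]
  constructor
  · intro H
    refine ⟨fun t ht hne => ?_, ?_⟩
    · have := (key t ht).mp (H t ht)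
      rwa [if_neg hne] at this
    · have := (key _ hT).mp (H _ hT)
      rwa [if_pos rfl] at this
  · rintro ⟨H1, H2⟩ t ht
    refine (key t ht).mpr ?_
    by_cases h : t = (if i < k then k - 1 - i else i - k)
    · rw [if_pos h]; exact H2
    · rw [if_neg h]; exact H1 t ht h

theorem symP_set_unpaired (l : List Int) (i k : Nat) (v : Int)
    (hi : i < l.length) (hk1 : 1 ≤ k) (hkn : k < l.length)
    (hnp : ¬(i < 2 * k ∧ 2 * k - 1 - i < l.length)) :
    pvSymP (l.set i v) k ↔ pvSymP l k := by
  unfold pvSymP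
  rw [List.length_set]
  have key : ∀ t : Nat, t < min k (l.length - k) →
      ((l.set i v).getD (k - 1 - t) 0 = (l.set i v).getD (k + t) 0 ↔
        l.getD (k - 1 - t) 0 = l.getD (k + t) 0) := by
    intro t ht
    have h1 : ¬ (k - 1 - t = i) := by omega
    have h2 : ¬ (k + t = i) := by omega
    rw [getD_set l i v _ hi, getD_set l i v _ hi, if_neg h1, if_neg h2]
  exact forall₂_congr key

theorem fsLoop_set_eq_symAfter (l : List Int) (i : Nat) (v skip : Int) (hi : i < l.length)
    (ks : List Int) (hks : ∀ k ∈ ks, 1 ≤ k ∧ k < (l.length : Int)) :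
    pvFsLoop (l.set i v) skip ks =
      pvSymAfter l (i : Int) v skip (ks.map (fun k => (k, pvMism l k))) := by
  induction ks with
  | nil => rfl
  | cons k rest ih =>
    obtain ⟨hk1, hklt⟩ := hks k (List.mem_cons_self)
    have hrest := fun k hk => hks k (List.mem_cons_of_mem _ hk)
    obtain ⟨kn, rfl⟩ : ∃ m : Nat, k = (m : Int) := ⟨k.toNat, by omega⟩
    have hkn1 : 1 ≤ kn := by omega
    have hknlt : kn < l.length := by omega
    rw [List.map_cons]
    show (if (kn : Int) = skip then _ else _) = (if (kn : Int) = skip then _ else _)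
    by_cases hsk : (kn : Int) = skip
    · rw [if_pos hsk, if_pos hsk]
      exact ih hrest
    · rw [if_neg hsk, if_neg hsk]
      have hsymA : (pvSymLoop
            ((PySem.List.slice (l.set i v) (some (0 : Int)) (some (kn : Int))).reverse)
            (PySem.List.slice (l.set i v) (some (kn : Int)) none) = true) ↔
          pvSymP (l.set i v) kn :=
        symA_iff (l.set i v) kn (by rw [List.length_set]; omega)
      by_cases hpair : (0 : Int) ≤ 2 * (kn : Int) - 1 - (i : Int) ∧
          2 * (kn : Int) - 1 - (i : Int) < (l.length : Int)
      · rw [if_pos hpair]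
        have hp1 : i < 2 * kn := by omega
        have hp2 : 2 * kn - 1 - i < l.length := by omega
        have ht0e : (if (i : Int) < (kn : Int) then (kn : Int) - 1 - (i : Int)
            else (i : Int) - (kn : Int)) = ((if i < kn then kn - 1 - i else i - kn : Nat) : Int) := by
          by_cases hik : i < kn
          · rw [if_pos (by exact_mod_cast hik), if_pos hik]; omega
          · rw [if_neg (by exact_mod_cast hik), if_neg hik]; omega
        have hpe : 2 * (kn : Int) - 1 - (i : Int) = ((2 * kn - 1 - i : Nat) : Int) := by
          omega
        have hiff : ((∀ t ∈ pvMism l (kn : Int),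
              t = (if (i : Int) < (kn : Int) then (kn : Int) - 1 - (i : Int)
                else (i : Int) - (kn : Int))) ∧
              v = PySem.List.pyGetD l (2 * (kn : Int) - 1 - (i : Int)) 0) ↔
            pvSymP (l.set i v) kn := by
          rw [symP_set_paired l i kn v hi hknlt hp1 hp2, ht0e, hpe,
            PySem.List.pyGetD_natCast,
            mism_all_iff l kn (if i < kn then kn - 1 - i else i - kn) (by omega)]
        by_cases hcond : (∀ t ∈ pvMism l (kn : Int),
            t = (if (i : Int) < (kn : Int) then (kn : Int) - 1 - (i : Int)
              else (i : Int) - (kn : Int))) ∧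
            v = PySem.List.pyGetD l (2 * (kn : Int) - 1 - (i : Int)) 0
        · rw [if_pos hcond, if_pos (hsymA.mpr (hiff.mp hcond))]
        · rw [if_neg hcond, if_neg (by
            intro hA
            exact hcond (hiff.mpr (hsymA.mp hA)))]
          exact ih hrest
      · rw [if_neg hpair]
        have hnp : ¬ (i < 2 * kn ∧ 2 * kn - 1 - i < l.length) := by omega
        have hiff : (pvMism l (kn : Int)).isEmpty = true ↔ pvSymP (l.set i v) kn := by
          rw [List.isEmpty_iff, mism_nil_iff l kn (by omega)]
          exact (symP_set_unpaired l i kn v hi hkn1 hknlt hnp).symm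
        by_cases hemp : (pvMism l (kn : Int)).isEmpty = true
        · rw [if_pos hemp, if_pos (hsymA.mpr (hiff.mp hemp))]
        · rw [if_neg hemp, if_neg (fun hA => hemp (hiff.mpr (hsymA.mp hA)))]
          exact ih hrest

theorem fsLoop_eq_firstSym (l : List Int) (skip : Int) (ks : List Int)
    (hks : ∀ k ∈ ks, 1 ≤ k ∧ k < (l.length : Int)) (hsk : ∀ k ∈ ks, k ≠ skip) :
    pvFsLoop l skip ks = pvFirstSym (ks.map (fun k => (k, pvMism l k))) := by
  induction ks with
  | nil => rfl
  | cons k rest ih =>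
    obtain ⟨hk1, hklt⟩ := hks k (List.mem_cons_self)
    have hne := hsk k (List.mem_cons_self)
    have hrest := ih (fun k hk => hks k (List.mem_cons_of_mem _ hk))
      (fun k hk => hsk k (List.mem_cons_of_mem _ hk))
    obtain ⟨kn, rfl⟩ : ∃ m : Nat, k = (m : Int) := ⟨k.toNat, by omega⟩
    rw [List.map_cons]
    show (if (kn : Int) = skip then _ else _) = (if (pvMism l (kn : Int)).isEmpty then _ else _)
    rw [if_neg hne]
    have hsymA := symA_iff l kn (by omega)
    have hiff : (pvMism l (kn : Int)).isEmpty = true ↔ pvSymP l kn := by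
      rw [List.isEmpty_iff, mism_nil_iff l kn (by omega)]
    by_cases hemp : (pvMism l (kn : Int)).isEmpty = true
    · rw [if_pos hemp, if_pos (hsymA.mpr (hiff.mp hemp))]
    · rw [if_neg hemp, if_neg (by
        intro hA
        exact hemp (hiff.mpr (hsymA.mp hA)))]
      exact hrest

theorem fsLoop_zero_or_ne (l : List Int) (e : Int) (ks : List Int) :
    pvFsLoop l e ks = 0 ∨ pvFsLoop l e ks ≠ e := by
  induction ks with
  | nil => exact Or.inl rfl
  | cons k rest ih =>
    simp only [pvFsLoop]
    by_cases hk : k = e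
    · rw [if_pos hk]
      exact ih
    · rw [if_neg hk]
      split_ifs with h
      · exact Or.inr hk
      · exact ih

theorem findSym_set_eq (l : List Int) (i : Nat) (v skip : Int) (hi : i < l.length) :
    pvFindSymmetry (l.set i v) skip = pvSymAfter l (i : Int) v skip (pvMismTable l) := by
  unfold pvFindSymmetry pvMismTable
  rw [List.length_set]
  exact fsLoop_set_eq_symAfter l i v skip hi _ (fun k hk => by
    have := PySem.List.mem_pyRange_one.mp hk
    exact ⟨this.1, this.2⟩)

theorem findSym_zero_or_ne (l : List Int) (e : Int) :
    pvFindSymmetry l e = 0 ∨ pvFindSymmetry l e ≠ e :=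
  fsLoop_zero_or_ne l e _

-- the two loops' stopping conditions agree, because a found line is never the skipped one
theorem cond_iff (rows columns : List Int) (i j : Nat) (va vc rs cs : Int)
    (hi : i < rows.length) (hj : j < columns.length) :
    ((pvSymAfter rows (i : Int) va rs (pvMismTable rows) ≠ rs ∧
        pvSymAfter rows (i : Int) va rs (pvMismTable rows) ≠ 0) ∨
      (pvSymAfter columns (j : Int) vc cs (pvMismTable columns) ≠ cs ∧
        pvSymAfter columns (j : Int) vc cs (pvMismTable columns) ≠ 0)) ↔
      (pvSymAfter rows (i : Int) va rs (pvMismTable rows) ≠ 0 ∨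
        pvSymAfter columns (j : Int) vc cs (pvMismTable columns) ≠ 0) := by
  have h1 : pvSymAfter rows (i : Int) va rs (pvMismTable rows) = 0 ∨
      pvSymAfter rows (i : Int) va rs (pvMismTable rows) ≠ rs := by
    rw [← findSym_set_eq rows i va rs hi]
    exact findSym_zero_or_ne _ _
  have h2 : pvSymAfter columns (j : Int) vc cs (pvMismTable columns) = 0 ∨
      pvSymAfter columns (j : Int) vc cs (pvMismTable columns) ≠ cs := by
    rw [← findSym_set_eq columns j vc cs hj]
    exact findSym_zero_or_ne _ _
  tauto

theorem query_lineIdxLoop (l : List Int) (i v skip : Int) (tbl : List (Int × List Int))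
    (d : PySem.Dict Int Int)
    (hd0 : ∀ w k0, d.get? w = some k0 → 1 ≤ k0)
    (hlt : ∀ w k0, d.get? w = some k0 → ∀ p ∈ tbl, k0 < p.1)
    (htbl : ∀ p ∈ tbl, 1 ≤ p.1)
    (hsort : tbl.Pairwise (fun a b => a.1 < b.1)) :
    pvQuery (pvLineIdxLoop l i skip d tbl) v = (d.get? v).getD (pvSymAfter l i v skip tbl) := by
  induction tbl generalizing d with
  | nil =>
    show pvQuery (d, 0) v = (d.get? v).getD 0
    unfold pvQuery
    cases hg : d.get? v with
    | none => simp [PySem.Dict.getD_eq_get?_getD, hg]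
    | some k0 =>
      have h1 := hd0 v k0 hg
      simp [PySem.Dict.getD_eq_get?_getD, hg]
      omega
  | cons p rest ih =>
    obtain ⟨k, ms⟩ := p
    have hsort' := (List.pairwise_cons.mp hsort).2
    have hhead := (List.pairwise_cons.mp hsort).1
    have hk1 : (1 : Int) ≤ k := htbl (k, ms) List.mem_cons_self
    have htbl' : ∀ p ∈ rest, (1 : Int) ≤ p.1 := fun p hp => htbl p (List.mem_cons_of_mem _ hp)
    have hltr : ∀ w k0, d.get? w = some k0 → ∀ p ∈ rest, k0 < p.1 :=
      fun w k0 hg p hp => hlt w k0 hg p (List.mem_cons_of_mem _ hp)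
    simp only [pvLineIdxLoop, pvSymAfter]
    by_cases hsk : k = skip
    · rw [if_pos hsk, if_pos hsk]
      exact ih d hd0 hltr htbl' hsort'
    · rw [if_neg hsk, if_neg hsk]
      by_cases hpair : (0 : Int) ≤ 2 * k - 1 - i ∧ 2 * k - 1 - i < (l.length : Int)
      · rw [if_pos hpair, if_pos hpair]
        set req := PySem.List.pyGetD l (2 * k - 1 - i) 0 with hreq
        set t0 := (if i < k then k - 1 - i else i - k) with ht0
        by_cases hall : ∀ t ∈ ms, t = t0
        · by_cases hct : d.contains req = false
          · rw [if_pos ⟨hall, hct⟩]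
            have hgn : d.get? req = none := by
              have hc := PySem.Dict.contains_eq_isSome_get? (d := d) (k := req)
              rw [hct] at hc
              cases hg : d.get? req with
              | none => rfl
              | some k0 => rw [hg] at hc; simp at hc
            have hd0' : ∀ w k0, (d.insert req k).get? w = some k0 → 1 ≤ k0 := by
              intro w k0 hg
              rw [PySem.Dict.get?_insert] at hg
              split_ifs at hg with hw
              · cases hg; exact hk1
              · exact hd0 w k0 hg
            have hlt' : ∀ w k0, (d.insert req k).get? w = some k0 → ∀ p ∈ rest, k0 < p.1 := by
              intro w k0 hg p hp
              rw [PySem.Dict.get?_insert] at hg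
              split_ifs at hg with hw
              · cases hg; exact hhead p hp
              · exact hltr w k0 hg p hp
            rw [ih _ hd0' hlt' htbl' hsort', PySem.Dict.get?_insert]
            by_cases hv : v = req
            · subst hv
              rw [if_pos rfl, hgn, if_pos ⟨hall, rfl⟩]
              rfl
            · rw [if_neg hv, if_neg (fun hc => hv hc.2)]
          · rw [if_neg (fun hc => hct hc.2)]
            have hct' : d.contains req = true := by
              revert hct; cases d.contains req <;> simp
            have hgs : ∃ k0, d.get? req = some k0 := by
              have hc := PySem.Dict.contains_eq_isSome_get? (d := d) (k := req)
              rw [hct'] at hc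
              cases hg : d.get? req with
              | none => rw [hg] at hc; simp at hc
              | some k0 => exact ⟨k0, rfl⟩
            obtain ⟨k0, hg⟩ := hgs
            rw [ih d hd0 hltr htbl' hsort']
            by_cases hv : v = req
            · subst hv
              rw [hg]
              simp
            · rw [if_neg (fun hc => hv hc.2)]
        · rw [if_neg (fun hc => hall hc.1), if_neg (fun hc => hall hc.1)]
          exact ih d hd0 hltr htbl' hsort'
      · rw [if_neg hpair, if_neg hpair]
        by_cases hemp : ms.isEmpty = true
        · rw [if_pos hemp, if_pos hemp]
          unfold pvQuery
          cases hg : d.get? v with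
          | none => simp [PySem.Dict.getD_eq_get?_getD, hg]
          | some k0 =>
            have h1 := hd0 v k0 hg
            have h2 := hlt v k0 hg (k, ms) List.mem_cons_self
            simp only [PySem.Dict.getD_eq_get?_getD, hg, Option.getD_some]
            rw [if_pos ⟨by omega, Or.inr h2⟩]
        · rw [if_neg hemp, if_neg hemp]
          exact ih d hd0 hltr htbl' hsort'

theorem query_lineIdx_top (l : List Int) (i v skip : Int) :
    pvQuery (pvLineIdx l i skip (pvMismTable l)) v = pvSymAfter l i v skip (pvMismTable l) := by
  unfold pvLineIdx
  rw [query_lineIdxLoop l i v skip _ PySem.Dict.empty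
    (fun w k0 hg => by simp [PySem.Dict.get?_empty] at hg)
    (fun w k0 hg => by simp [PySem.Dict.get?_empty] at hg)
    (by
      unfold pvMismTable
      intro p hp
      obtain ⟨k, hk, rfl⟩ := List.mem_map.mp hp
      exact (PySem.List.mem_pyRange_one.mp hk).1)
    (by
      unfold pvMismTable
      refine List.Pairwise.map _ (fun a b h => ?_)
        (PySem.List.pairwise_lt_pyRange_one 1 (l.length : Int))
      simpa using h)]
  simp [PySem.Dict.get?_empty]

theorem cellLoop_eq (rows columns : List Int) (rs cs : Int) (i j : Nat) (chars : List Char)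
    (hi : i < rows.length) (hj : j + chars.length ≤ columns.length) :
    pvCellLoopA rows columns rs cs i j chars =
      pvCellLoopB rows columns
        ((PySem.List.pyRange 0 (columns.length : Int) 1).map
          (fun j => pvLineIdx columns j cs (pvMismTable columns)))
        (pvLineIdx rows (i : Int) rs (pvMismTable rows)) rs cs i j chars := by
  revert hj
  induction chars generalizing j with
  | nil => intro _; rfl
  | cons c rest ih =>
    intro hj
    have hj' : j < columns.length := by simp at hj; omega
    have hrec := ih (j + 1) (by simp at hj ⊢; omega)
    simp only [pvCellLoopA, pvCellLoopB]
    rw [PySem.List.pyGetD_map_pyRange _ columns.length j _ hj']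
    rw [query_lineIdx_top, query_lineIdx_top]
    by_cases hc : c = '#'
    · simp only [if_pos hc]
      simp only [PySem.List.pySetD_natCast]
      rw [findSym_set_eq rows i _ rs hi, findSym_set_eq columns j _ cs hj']
      simp only [neg_one_mul, ← sub_eq_add_neg]
      exact if_congr (cond_iff rows columns i j _ _ rs cs hi hj') rfl hrec
    · simp only [if_neg hc]
      simp only [PySem.List.pySetD_natCast]
      rw [findSym_set_eq rows i _ rs hi, findSym_set_eq columns j _ cs hj']
      simp only [one_mul]
      exact if_congr (cond_iff rows columns i j _ _ rs cs hi hj') rfl hrec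

theorem rowLoop_eq (rows columns : List Int) (rs cs : Int) (i : Nat) (ps : List String)
    (hi : i + ps.length ≤ rows.length) (hc : ∀ s ∈ ps, s.toList.length ≤ columns.length) :
    pvRowLoopA rows columns rs cs i ps =
      pvRowLoopB rows columns (pvMismTable rows)
        ((PySem.List.pyRange 0 (columns.length : Int) 1).map
          (fun j => pvLineIdx columns j cs (pvMismTable columns))) rs cs i ps := by
  revert hi hc
  induction ps generalizing i with
  | nil => intro _ _; rfl
  | cons r rest ih =>
    intro hi hc
    simp only [pvRowLoopA, pvRowLoopB]
    rw [cellLoop_eq rows columns rs cs i 0 r.toList (by simp at hi; omega)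
      (by simpa using hc r List.mem_cons_self)]
    cases hm : pvCellLoopB rows columns
        ((PySem.List.pyRange 0 (columns.length : Int) 1).map
          (fun j => pvLineIdx columns j cs (pvMismTable columns)))
        (pvLineIdx rows (i : Int) rs (pvMismTable rows)) rs cs i 0 r.toList with
    | some out => rfl
    | none =>
      exact ih (i + 1) (by simp at hi ⊢; omega)
        (fun s hs => hc s (List.mem_cons_of_mem _ hs))

theorem firstSym_eq (l : List Int) : pvFindSymmetry l 0 = pvFirstSym (pvMismTable l) := by
  unfold pvFindSymmetry pvMismTable
  exact fsLoop_eq_firstSym l 0 _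
    (fun k hk => PySem.List.mem_pyRange_one.mp hk)
    (fun k hk => by have := PySem.List.mem_pyRange_one.mp hk; omega)

-- ===== VERDICT (by name: the statement is the Claim_ definition above) =====
theorem find_new_symmetry_spec : Claim_equal_find_new_symmetry := by
  intro pattern rows columns _ hpre
  unfold Spec_find_new_symmetry find_new_symmetry find_new_symmetry_alt
  dsimp only
  rw [firstSym_eq rows, firstSym_eq columns,
    rowLoop_eq rows columns _ _ 0 pattern (by simpa using hpre.1) hpre.2]
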